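-- pv_equiv track=rewrite | github.com/workhardliuzheng/stock-analysis | report_generator.py | get_market_sentiment
-- ===== SOURCE A (Python) =====
-- def get_market_sentiment(signals_data):
--     """获取市场情绪"""
--     if not signals_data:
--         return "数据不足"
--
--     buy_count = sum(1 for d in signals_data.values() if d.get('signal') == 'BUY')
--     sell_count = sum(1 for d in signals_data.values() if d.get('signal') == 'SELL')
--     hold_count = sum(1 for d in signals_data.values() if d.get('signal') == 'HOLD')
--
--     total = len(signals_data)
--     if buy_count > total * 0.5:
--         return "📈 看涨情绪主导，建议积极建仓"
--     elif sell_count > total * 0.5: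
--         return "📉 看跌情绪主导，建议减仓观望"
--     elif hold_count > total * 0.5:
--         return "⏸️ 市场观望情绪浓厚，建议保持仓位"
--     else:
--         return "📊 市场分歧明显，建议谨慎操作"
-- ===== SOURCE B (Python) =====
-- def get_market_sentiment(signals_data):
--     """获取市场情绪"""
--     if not signals_data:
--         return "数据不足"
--
--     # Boyer-Moore majority vote over the signal stream: a strict >50% majority
--     # signal is unique if it exists, and the vote's surviving candidate is the
--     # only possible majority; one verification count confirms or rejects it.
--     cand, cnt = None, 0
--     for d in signals_data.values():
--         s = d.get('signal')
--         if cnt == 0: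
--             cand, cnt = s, 1
--         elif s == cand:
--             cnt += 1
--         else:
--             cnt -= 1
--
--     total = len(signals_data)
--     if 2 * sum(1 for d in signals_data.values() if d.get('signal') == cand) > total:
--         if cand == 'BUY':
--             return "📈 看涨情绪主导，建议积极建仓"
--         if cand == 'SELL':
--             return "📉 看跌情绪主导，建议减仓观望"
--         if cand == 'HOLD':
--             return "⏸️ 市场观望情绪浓厚，建议保持仓位"
--     return "📊 市场分歧明显，建议谨慎操作"
-- ===== Notes on version B (the rewrite author's own statement) =====
-- stated objective: alternative
-- what changed: B replaces A's three per-label counting scans with the Boyer-Moore majority-vote algorithm: one vote pass finds the only possible strict-majority signal, one verification pass confirms it, and the message is chosen from the verified candidate (a >50% majority is unique, so A's cascade order is immaterial).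
import Mathlib
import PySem

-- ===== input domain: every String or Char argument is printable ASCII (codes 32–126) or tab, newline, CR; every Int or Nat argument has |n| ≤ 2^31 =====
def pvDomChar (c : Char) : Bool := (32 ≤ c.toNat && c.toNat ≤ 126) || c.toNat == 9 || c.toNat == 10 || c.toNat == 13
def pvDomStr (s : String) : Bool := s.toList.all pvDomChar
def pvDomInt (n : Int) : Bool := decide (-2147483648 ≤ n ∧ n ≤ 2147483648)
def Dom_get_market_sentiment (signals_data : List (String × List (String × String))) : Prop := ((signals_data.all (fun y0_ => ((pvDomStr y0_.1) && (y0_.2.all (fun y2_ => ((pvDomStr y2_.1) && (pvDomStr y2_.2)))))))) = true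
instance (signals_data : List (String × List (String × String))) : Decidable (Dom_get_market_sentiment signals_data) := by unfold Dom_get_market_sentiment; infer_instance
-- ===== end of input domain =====

-- B finds the unique possible >50% majority signal via Boyer-Moore majority vote (vote pass + one verification count) instead of A's three per-label counting scans (objective: alternative algorithm; same cost).


-- ===== PORT A =====
-- 'count > total * 0.5' on ints is ported exactly as '2 * count > total' (exact for these magnitudes).
def get_market_sentiment (signals_data : List (String × List (String × String))) : String :=
  if signals_data.isEmpty then "数据不足"
  else
    let vals := signals_data.map Prod.snd
    let buy_count := vals.foldl (fun acc d => if (PySem.Dict.mk d).get? "signal" == some "BUY" then acc + 1 else acc) (0 : Int)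
    let sell_count := vals.foldl (fun acc d => if (PySem.Dict.mk d).get? "signal" == some "SELL" then acc + 1 else acc) (0 : Int)
    let hold_count := vals.foldl (fun acc d => if (PySem.Dict.mk d).get? "signal" == some "HOLD" then acc + 1 else acc) (0 : Int)
    let total : Int := signals_data.length
    if 2 * buy_count > total then "📈 看涨情绪主导，建议积极建仓"
    else if 2 * sell_count > total then "📉 看跌情绪主导，建议减仓观望"
    else if 2 * hold_count > total then "⏸️ 市场观望情绪浓厚，建议保持仓位"
    else "📊 市场分歧明显，建议谨慎操作"

-- ===== PORT B =====
-- One Boyer-Moore vote step: empty counter adopts the new signal, a match increments, a mismatch decrements.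
def pvBmStep (st : Option String × Int) (s : Option String) : Option String × Int :=
  if st.2 == 0 then (s, 1)
  else if s == st.1 then (st.1, st.2 + 1)
  else (st.1, st.2 - 1)

def get_market_sentiment_alt (signals_data : List (String × List (String × String))) : String :=
  if signals_data.isEmpty then "数据不足"
  else
    let st := signals_data.foldl (fun st y => pvBmStep st ((PySem.Dict.mk y.2).get? "signal")) ((none : Option String), (0 : Int))
    let cand := st.1
    let total : Int := signals_data.length
    let ver := signals_data.foldl (fun acc y => if (PySem.Dict.mk y.2).get? "signal" == cand then acc + 1 else acc) (0 : Int)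
    if 2 * ver > total then
      if cand == some "BUY" then "📈 看涨情绪主导，建议积极建仓"
      else if cand == some "SELL" then "📉 看跌情绪主导，建议减仓观望"
      else if cand == some "HOLD" then "⏸️ 市场观望情绪浓厚，建议保持仓位"
      else "📊 市场分歧明显，建议谨慎操作"
    else "📊 市场分歧明显，建议谨慎操作"

-- ===== PRECONDITION & SPEC =====
def Spec_get_market_sentiment (signals_data : List (String × List (String × String))) (out : String) : Prop := out = get_market_sentiment_alt signals_data
instance (signals_data : List (String × List (String × String))) (out : String) : Decidable (Spec_get_market_sentiment signals_data out) := by unfold Spec_get_market_sentiment; infer_instance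

-- ===== CLAIM (what is proved, stated in full; the proofs are below) =====
def Claim_equal_get_market_sentiment : Prop := ∀ (signals_data : List (String × List (String × String))), Dom_get_market_sentiment signals_data → Spec_get_market_sentiment signals_data (get_market_sentiment signals_data)

-- ===== LEMMAS AND PROOFS =====
-- Boyer-Moore invariant: the final counter is nonnegative, and for every value v the
-- doubled count of v among the processed signals is bounded by length ± the counter
-- (minus the initial state's contribution).
-- the single-step change of the Boyer-Moore potential bounds the step's contribution to any value's count
theorem pvBmStep_bound (st : Option String × Int) (s v : Option String) :
    (if (s == v) = true then (1:Int) else 0) * 2 ≤ 1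
      + (if v = (pvBmStep st s).1 then (pvBmStep st s).2 else -(pvBmStep st s).2)
      - (if v = st.1 then st.2 else -st.2) := by
  simp only [pvBmStep]
  split_ifs <;> simp_all <;> omega

theorem pvBm_inv (sigs : List (Option String)) (st : Option String × Int) (h : 0 ≤ st.2) :
    0 ≤ (sigs.foldl pvBmStep st).2 ∧
    ∀ v : Option String,
      2 * (sigs.countP (fun s => s == v) : Int) ≤
        (sigs.length : Int)
        + (if v = (sigs.foldl pvBmStep st).1 then (sigs.foldl pvBmStep st).2 else -(sigs.foldl pvBmStep st).2)
        - (if v = st.1 then st.2 else -st.2) := by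
  induction sigs generalizing st with
  | nil =>
    refine ⟨by simpa using h, fun v => ?_⟩
    simp only [List.foldl_nil, List.countP_nil, List.length_nil]
    push_cast
    split <;> omega
  | cons s rest ih =>
    have hst' : 0 ≤ (pvBmStep st s).2 := by
      simp only [pvBmStep]
      split_ifs <;> simp_all <;> omega
    obtain ⟨hk, hcnt⟩ := ih (pvBmStep st s) hst'
    refine ⟨by simpa using hk, fun v => ?_⟩
    have hv := hcnt v
    simp only [List.foldl_cons] at *
    simp only [List.countP_cons, List.length_cons]
    push_cast
    have step := pvBmStep_bound st s v
    omega

-- ===== VERDICT (by name: the statement is the Claim_ definition above) =====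
theorem get_market_sentiment_spec : Claim_equal_get_market_sentiment := by
  intro sd _
  unfold Spec_get_market_sentiment get_market_sentiment get_market_sentiment_alt
  by_cases he : sd.isEmpty
  · simp [he]
  · simp only [he, Bool.false_eq_true, if_false]
    set sigs := sd.map (fun y => (PySem.Dict.mk y.2).get? "signal") with hsigs
    set st := sigs.foldl pvBmStep ((none : Option String), (0:Int)) with hst
    obtain ⟨hk, hb⟩ := pvBm_inv sigs ((none : Option String), (0:Int)) (le_refl 0)
    simp only [neg_zero, ite_self, sub_zero] at hb
    have hlen : (sigs.length : Int) = (sd.length : Int) := by simp [hsigs]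
    have hcount : ∀ L : String,
        (sd.map Prod.snd).foldl (fun acc d => if (PySem.Dict.mk d).get? "signal" == some L then acc + 1 else acc) (0:Int)
        = (sigs.countP (fun s => s == some L) : Int) := by
      intro L
      rw [PySem.List.foldl_if_add_one]
      simp [hsigs, List.countP_map, Function.comp_def]
    have hver : sd.foldl (fun c y => pvBmStep c ((PySem.Dict.mk y.2).get? "signal")) ((none : Option String), (0:Int)) = st := by
      rw [hst, hsigs, List.foldl_map]
    have hverc : ∀ v : Option String,
        sd.foldl (fun acc y => if (PySem.Dict.mk y.2).get? "signal" == v then acc + 1 else acc) (0:Int)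
        = (sigs.countP (fun s => s == v) : Int) := by
      intro v
      rw [PySem.List.foldl_if_add_one]
      simp [hsigs, List.countP_map, Function.comp_def]
    have hmaj : ∀ v : Option String,
        2 * (sigs.countP (fun s => s == v) : Int) > (sd.length : Int) → st.1 = v := by
      intro v hgt
      by_contra hne'
      have hbv := hb v
      rw [if_neg (fun e => hne' e.symm)] at hbv
      omega
    simp only [hcount, hver, hverc]
    by_cases h1 : 2 * (sigs.countP (fun s => s == some "BUY") : Int) > (sd.length : Int)
    · have hc := hmaj _ h1
      rw [hc]
      simp [h1]
    · by_cases h2 : 2 * (sigs.countP (fun s => s == some "SELL") : Int) > (sd.length : Int)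
      · have hc := hmaj _ h2
        rw [hc]
        simp [h1, h2]
      · by_cases h3 : 2 * (sigs.countP (fun s => s == some "HOLD") : Int) > (sd.length : Int)
        · have hc := hmaj _ h3
          rw [hc]
          simp [h1, h2, h3]
        · simp only [h1, h2, h3, if_false]
          by_cases hv : 2 * (sigs.countP (fun s => s == st.1) : Int) > (sd.length : Int)
          · have hB : st.1 ≠ some "BUY" := fun e => h1 (by rw [← e]; exact hv)
            have hS : st.1 ≠ some "SELL" := fun e => h2 (by rw [← e]; exact hv)
            have hH : st.1 ≠ some "HOLD" := fun e => h3 (by rw [← e]; exact hv)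
            simp [hv, hB, hS, hH]
          · simp [hv]
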